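-- pv_equiv track=rewrite | github.com/kgaitanis/BeYourOwnBank | internal/createPDF.py | format_hex_text
-- ===== SOURCE A (Python) =====
-- def format_hex_text(text):
--     output = ''
--     chars_per_block = 4
--     blocks_per_line = 10
--     i = 0
--     while i*chars_per_block < len(text):
--         output += text[i*chars_per_block:(i+1)*chars_per_block] + ' '
--         i += 1
--         if i % blocks_per_line == 0:
--             output += '\n'
--
--     return output
-- ===== SOURCE B (Python) =====
-- def format_hex_text(text):
--     blocks = [text[j:j+4] for j in range(0, len(text), 4)]
--     groups = [blocks[k:k+10] for k in range(0, len(blocks), 10)]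
--     return ''.join(
--         ''.join(b + ' ' for b in g) + ('\n' if len(g) == 10 else '')
--         for g in groups)
-- ===== Notes on version B (the rewrite author's own statement) =====
-- stated objective: alternative
-- what changed: Replaced the single index-driven while loop with stateful concatenation by a two-level decomposition: slice the text into 4-char blocks, partition blocks into groups of 10, render each group as one line (newline only on full groups) and join.
import Mathlib
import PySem

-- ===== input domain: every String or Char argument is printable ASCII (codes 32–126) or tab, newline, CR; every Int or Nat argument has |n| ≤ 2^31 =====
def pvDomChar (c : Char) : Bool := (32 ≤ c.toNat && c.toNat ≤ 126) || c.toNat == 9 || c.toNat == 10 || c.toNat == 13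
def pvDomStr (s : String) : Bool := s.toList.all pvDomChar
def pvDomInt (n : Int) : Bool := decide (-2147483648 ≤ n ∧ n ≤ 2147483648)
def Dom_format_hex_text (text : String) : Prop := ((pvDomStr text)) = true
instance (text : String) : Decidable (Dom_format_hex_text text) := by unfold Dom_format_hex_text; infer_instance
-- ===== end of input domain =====

-- B replaces A's index-driven while loop with string concatenation by a two-level
-- decomposition (4-char blocks, groups of 10 blocks, one rendered line per group); same output.

-- ===== PORT A =====
-- A's while loop; the slice text[i*4:(i+1)*4] with nonnegative bounds is exactly
-- (drop (i*4)).take 4 on the character list.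
def pvALoop (cs : List Char) (out : List Char) (i : Nat) : List Char :=
  if i * 4 < cs.length then
    let out := out ++ (cs.drop (i * 4)).take 4 ++ [' ']
    let i := i + 1
    let out := if i % 10 == 0 then out ++ ['\n'] else out
    pvALoop cs out i
  else out
termination_by cs.length - i * 4
decreasing_by omega

def format_hex_text (text : String) : String :=
  String.ofList (pvALoop text.toList [] 0)

-- ===== PORT B =====
-- [text[j:j+4] for j in range(0, len(text), 4)]
def pvChunks4 (cs : List Char) : List (List Char) :=
  if cs = [] then [] else cs.take 4 :: pvChunks4 (cs.drop 4)
termination_by cs.length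
decreasing_by rename_i h; cases cs with | nil => exact absurd rfl h | cons a t => simp

-- [blocks[k:k+10] for k in range(0, len(blocks), 10)]
def pvChunks10 (bs : List (List Char)) : List (List (List Char)) :=
  if bs = [] then [] else bs.take 10 :: pvChunks10 (bs.drop 10)
termination_by bs.length
decreasing_by rename_i h; cases bs with | nil => exact absurd rfl h | cons a t => simp

-- ''.join(b + ' ' for b in g) + ('\n' if len(g) == 10 else '')
def pvLine (g : List (List Char)) : List Char :=
  (g.map (fun b => b ++ [' '])).flatten ++ (if g.length == 10 then ['\n'] else [])

def format_hex_text_alt (text : String) : String :=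
  String.ofList (((pvChunks10 (pvChunks4 text.toList)).map pvLine).flatten)

-- ===== PRECONDITION & SPEC =====
def Spec_format_hex_text (text : String) (out : String) : Prop := out = format_hex_text_alt text
instance (text : String) (out : String) : Decidable (Spec_format_hex_text text out) := by unfold Spec_format_hex_text; infer_instance

-- ===== CLAIM (what is proved, stated in full; the proofs are below) =====
def Claim_equal_format_hex_text : Prop := ∀ (text : String), Dom_format_hex_text text → Spec_format_hex_text text (format_hex_text text)

-- ===== LEMMAS AND PROOFS =====

-- A's loop rendered forward over the block list, with the running block index i.
def pvG (bs : List (List Char)) (i : Nat) : List Char :=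
  match bs with
  | [] => []
  | b :: t => b ++ [' '] ++ (if (i + 1) % 10 == 0 then ['\n'] else []) ++ pvG t (i + 1)

-- the same, parameterised by c = blocks left until the newline (c = 10 - i % 10)
def pvH (bs : List (List Char)) (c : Nat) : List Char :=
  match bs with
  | [] => []
  | b :: t => b ++ [' '] ++ (if c = 1 then ['\n'] else []) ++ pvH t (if c = 1 then 10 else c - 1)

theorem pvALoop_eq_pvG (cs : List Char) (out : List Char) (i : Nat) :
    pvALoop cs out i = out ++ pvG (pvChunks4 (cs.drop (i * 4))) i := by
  rw [pvALoop]
  by_cases h : i * 4 < cs.length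
  · simp only [if_pos h]
    have hne : cs.drop (i * 4) ≠ [] := by
      intro he; have := congrArg List.length he; simp at this; omega
    rw [pvChunks4, if_neg hne]
    have hdd : (cs.drop (i * 4)).drop 4 = cs.drop ((i + 1) * 4) := by
      rw [List.drop_drop]; ring_nf
    rw [pvG]
    by_cases h10 : (i + 1) % 10 = 0
    · simp only [h10]
      rw [pvALoop_eq_pvG cs _ (i + 1), hdd]
      simp
    · have : ((i + 1) % 10 == 0) = false := by simp [h10]
      simp only [this]
      rw [pvALoop_eq_pvG cs _ (i + 1), hdd]
      simp
  · simp only [if_neg h]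
    have : cs.drop (i * 4) = [] := by
      apply List.drop_eq_nil_of_le; omega
    rw [this, pvChunks4]
    simp [pvG]
termination_by cs.length - i * 4
decreasing_by all_goals omega

theorem pvG_eq_pvH (bs : List (List Char)) (i : Nat) :
    pvG bs i = pvH bs (10 - i % 10) := by
  induction bs generalizing i with
  | nil => rfl
  | cons b t ih =>
    rw [pvG, pvH]
    by_cases h : (i + 1) % 10 = 0
    · have hc : 10 - i % 10 = 1 := by omega
      have hn : 10 - (i + 1) % 10 = 10 := by omega
      simp only [h, hc]
      rw [ih (i + 1), hn]
      simp
    · have hc : ¬ (10 - i % 10 = 1) := by omega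
      have hn : 10 - (i + 1) % 10 = (10 - i % 10) - 1 := by omega
      have hb : ((i + 1) % 10 == 0) = false := by simp [h]
      simp only [hb, if_neg hc]
      rw [ih (i + 1), hn]
      simp

theorem pvH_unroll (bs : List (List Char)) (c : Nat) (h1 : 1 ≤ c) (h10 : c ≤ 10) :
    pvH bs c = ((bs.take c).map (fun b => b ++ [' '])).flatten
      ++ (if c ≤ bs.length then ['\n'] else []) ++ pvH (bs.drop c) 10 := by
  induction bs generalizing c with
  | nil =>
    simp [pvH]; omega
  | cons b t ih =>
    rw [pvH]
    by_cases hc : c = 1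
    · subst hc; simp
    · have h2 : 2 ≤ c := by omega
      have : (if c = 1 then 10 else c - 1) = c - 1 := by simp [hc]
      rw [this, ih (c - 1) (by omega) (by omega)]
      have htake : (b :: t).take c = b :: t.take (c - 1) := by
        cases c with | zero => omega | succ n => simp
      have hdrop : (b :: t).drop c = t.drop (c - 1) := by
        cases c with | zero => omega | succ n => simp
      have hlen : (c ≤ (b :: t).length) = (c - 1 ≤ t.length) := by
        simp only [List.length_cons]; exact propext (by omega)
      rw [htake, hdrop]
      simp only [List.map_cons, List.flatten_cons, hlen, if_neg hc]
      simp

theorem pvH_eq_lines (bs : List (List Char)) :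
    pvH bs 10 = ((pvChunks10 bs).map pvLine).flatten := by
  by_cases h : bs = []
  · subst h; rw [pvChunks10]; rfl
  · rw [pvChunks10, if_neg h, pvH_unroll bs 10 (by omega) (by omega),
      pvH_eq_lines (bs.drop 10)]
    simp only [List.map_cons, List.flatten_cons, pvLine]
    simp
termination_by bs.length
decreasing_by cases bs with | nil => exact absurd rfl h | cons a t => simp

-- ===== VERDICT (by name: the statement is the Claim_ definition above) =====
theorem format_hex_text_spec : Claim_equal_format_hex_text := by
  intro text _
  show format_hex_text text = format_hex_text_alt text
  unfold format_hex_text format_hex_text_alt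
  rw [pvALoop_eq_pvG]
  simp only [Nat.zero_mul, List.drop_zero, List.nil_append]
  rw [pvG_eq_pvH, pvH_eq_lines]
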